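-- pv_equiv track=rewrite | github.com/PROxZIMA/Advent-of-Code | 2020/Day 11/day-11.py | part2
-- ===== SOURCE A (Python) =====
-- import copy
--
-- def total_occu(lis):
--     total = 0
--     for i in lis:
--         for j in i:
--             if j == '#':
--                 total += 1
--
--     return total
--
-- def occu_seat_alld(lis, r, c, para):
--     height, width = len(lis) - 1, len(lis[0]) - 1
--     surr = ''
--
--     for i in range(c + 1, width):
--         if lis[r][i] != '.':
--             surr += lis[r][i]
--             break
--
--     for i, j in zip(range(r + 1, height), range(c + 1, width)):
--         if lis[i][j] != '.':
--             surr += lis[i][j]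
--             break
--
--     for i in range(r + 1, height):
--         if lis[i][c] != '.':
--             surr += lis[i][c]
--             break
--
--     for i, j in zip(range(r + 1, height), range(c - 1, 0, -1)):
--         if lis[i][j] != '.':
--             surr += lis[i][j]
--             break
--
--     for i in range(c - 1, 0, -1):
--         if lis[r][i] != '.':
--             surr += lis[r][i]
--             break
--
--     for i, j in zip(range(r - 1, 0, -1), range(c - 1, 0, -1)):
--         if lis[i][j] != '.':
--             surr += lis[i][j]
--             break
--
--     for i in range(r - 1, 0, -1):
--         if lis[i][c] != '.':
--             surr += lis[i][c]
--             break
--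
--     for i, j in zip(range(r - 1, 0, -1), range(c + 1, width)):
--         if lis[i][j] != '.':
--             surr += lis[i][j]
--             break
--
--     if para == 'no':
--         return '#' not in surr
--     else:
--         return surr.count('#') >= 5
--
-- def part2(data):
--     temp_lay = copy.deepcopy(data)
--     height, width = len(data) - 1, len(data[0]) - 1
--
--     for row in range(1, height):
--         for seat in range(1, width):
--
--             if data[row][seat] == 'L' and occu_seat_alld(data, row, seat, 'no'):
--                 temp_lay[row][seat] = '#'
--
--             elif data[row][seat] == '#' and occu_seat_alld(data, row, seat, 'five'):
--                 temp_lay[row][seat] = 'L'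
--
--     if temp_lay == data:
--         return total_occu(temp_lay)
--     else:
--         return part2(temp_lay)
-- ===== SOURCE B (Python) =====
-- def part2(data):
--     height, width = len(data) - 1, len(data[0]) - 1
--
--     def first_seat(ray):
--         # first non-floor cell along the ray (floor pattern never changes)
--         return next((p for p in ray if data[p[0]][p[1]] != '.'), None)
--
--     # Precompute, once, the fixed line-of-sight neighbour of every interior
--     # cell in each of the eight directions.
--     nbrs = []
--     for r in range(1, height):
--         for c in range(1, width):
--             rays = [
--                 [(r, j) for j in range(c + 1, width)],
--                 list(zip(range(r + 1, height), range(c + 1, width))),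
--                 [(i, c) for i in range(r + 1, height)],
--                 list(zip(range(r + 1, height), range(c - 1, 0, -1))),
--                 [(r, j) for j in range(c - 1, 0, -1)],
--                 list(zip(range(r - 1, 0, -1), range(c - 1, 0, -1))),
--                 [(i, c) for i in range(r - 1, 0, -1)],
--                 list(zip(range(r - 1, 0, -1), range(c + 1, width))),
--             ]
--             nbrs.append(((r, c), [p for p in map(first_seat, rays) if p is not None]))
--
--     grid = data
--     while True:
--         new = [row[:] for row in grid]
--         for (r, c), ps in nbrs:
--             cell = grid[r][c]
--             occ = sum(grid[i][j].count('#') for i, j in ps)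
--             if cell == 'L' and occ == 0:
--                 new[r][c] = '#'
--             elif cell == '#' and occ >= 5:
--                 new[r][c] = 'L'
--         if new == grid:
--             return sum(row.count('#') for row in grid)
--         grid = new
-- ===== Notes on version B (the rewrite author's own statement) =====
-- stated objective: alternative
-- what changed: B precomputes each interior cell's fixed line-of-sight neighbour positions once (the floor pattern never changes), then iterates the automaton with an explicit while-loop that only counts '#' at those stored positions, instead of A's recursion that rescans all eight rays from every cell on every step.
import Mathlib
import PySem

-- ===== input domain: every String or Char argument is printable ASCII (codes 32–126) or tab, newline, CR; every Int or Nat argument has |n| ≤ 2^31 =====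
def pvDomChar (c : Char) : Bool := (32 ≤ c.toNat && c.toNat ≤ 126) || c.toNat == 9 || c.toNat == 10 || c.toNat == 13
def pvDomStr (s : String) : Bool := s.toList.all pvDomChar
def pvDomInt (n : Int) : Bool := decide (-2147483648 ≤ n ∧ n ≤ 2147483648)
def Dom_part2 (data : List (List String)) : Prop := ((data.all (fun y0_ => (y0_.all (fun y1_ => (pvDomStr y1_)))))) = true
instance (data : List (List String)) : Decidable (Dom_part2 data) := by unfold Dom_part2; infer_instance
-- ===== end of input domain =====

-- B precomputes every interior cell's fixed line-of-sight neighbour positions once and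
-- iterates the automaton over those stored neighbours, instead of A's recursion that
-- rescans all eight rays from every cell each step; return values are proved equal.

-- shared cell access: lis[i][j] with Python indexing, total via defaults (Pre_ excludes
-- the inputs where Python raises IndexError)
def pvCell (lis : List (List String)) (i j : Int) : String :=
  PySem.List.pyGetD (PySem.List.pyGetD lis i []) j ""

-- shared in-place row assignment temp[r][c] = v; r, c always come from range(1, …) so
-- they are ≥ 1 and toNat is exact (no negative-index wraparound ever reaches this)
def pvSet (t : List (List String)) (r c : Int) (v : String) : List (List String) :=
  t.set r.toNat ((t.getD r.toNat []).set c.toNat v)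

-- ===== PORT A =====

def totalOccu (lis : List (List String)) : Int :=
  lis.foldl (fun total i => i.foldl (fun t j => if j == "#" then t + 1 else t) total) 0

-- one of A's eight 'for … : if lis[i][j] != '.': surr += lis[i][j]; break' loops,
-- over the materialised list of visited positions
def pvFirstHit (lis : List (List String)) (ps : List (Int × Int)) : String :=
  match ps with
  | [] => ""
  | p :: rest =>
    if pvCell lis p.1 p.2 ≠ "." then pvCell lis p.1 p.2 else pvFirstHit lis rest

-- the eight position sequences A's eight loops visit from (r, c)
def pvRays (height width r c : Int) : List (List (Int × Int)) :=
  [ (PySem.List.pyRange (c+1) width 1).map (fun j => (r, j)),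
    (PySem.List.pyRange (r+1) height 1).zip (PySem.List.pyRange (c+1) width 1),
    (PySem.List.pyRange (r+1) height 1).map (fun i => (i, c)),
    (PySem.List.pyRange (r+1) height 1).zip (PySem.List.pyRange (c-1) 0 (-1)),
    (PySem.List.pyRange (c-1) 0 (-1)).map (fun j => (r, j)),
    (PySem.List.pyRange (r-1) 0 (-1)).zip (PySem.List.pyRange (c-1) 0 (-1)),
    (PySem.List.pyRange (r-1) 0 (-1)).map (fun i => (i, c)),
    (PySem.List.pyRange (r-1) 0 (-1)).zip (PySem.List.pyRange (c+1) width 1) ]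

-- surr is built as the concatenation (List Char) of the hit strings of the eight loops;
-- '#' in surr is char membership and surr.count('#') with a one-char needle is the
-- char count — both exact
def occuSeatAlld (lis : List (List String)) (r c : Int) (para : String) : Bool :=
  let height : Int := (lis.length : Int) - 1
  let width : Int := ((PySem.List.pyGetD lis 0 []).length : Int) - 1
  let surr : List Char :=
    ((pvRays height width r c).map (fun ray => (pvFirstHit lis ray).toList)).flatten
  if para == "no" then !(surr.contains '#')
  else decide (5 ≤ surr.count '#')

-- one pass of A's part2 building temp_lay from data
def pvStepA (data : List (List String)) : List (List String) :=
  let height : Int := (data.length : Int) - 1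
  let width : Int := ((PySem.List.pyGetD data 0 []).length : Int) - 1
  (PySem.List.pyRange 1 height 1).foldl (fun temp row =>
    (PySem.List.pyRange 1 width 1).foldl (fun temp seat =>
      if pvCell data row seat == "L" && occuSeatAlld data row seat "no" then
        pvSet temp row seat "#"
      else if pvCell data row seat == "#" && occuSeatAlld data row seat "five" then
        pvSet temp row seat "L"
      else temp) temp) data

-- totality fuel for Python's unbounded recursion/while: strictly more than the number of
-- configurations reachable by flipping cells, so the guard is never the cause of a result
-- whenever the Python run returns
def pvFuel (data : List (List String)) : Nat :=
  2 ^ (data.length * (PySem.List.pyGetD data 0 []).length) + 1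

def pvLoopA : Nat → List (List String) → Int
  | 0, data => totalOccu data
  | fuel+1, data =>
    let temp := pvStepA data
    if temp == data then totalOccu temp else pvLoopA fuel temp

def part2 (data : List (List String)) : Int := pvLoopA (pvFuel data) data

-- ===== PORT B =====

-- first non-floor position along a ray, looked up in the ORIGINAL grid (Source B first_seat)
def pvFirstSeat (data : List (List String)) (ray : List (Int × Int)) : Option (Int × Int) :=
  ray.find? (fun p => !(pvCell data p.1 p.2 == "."))

-- precomputed list of (cell, its visible neighbours) for every interior cell (Source B nbrs)
def pvBuildNbrs (data : List (List String)) : List ((Int × Int) × List (Int × Int)) :=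
  let height : Int := (data.length : Int) - 1
  let width : Int := ((PySem.List.pyGetD data 0 []).length : Int) - 1
  (PySem.List.pyRange 1 height 1).foldl (fun acc r =>
    (PySem.List.pyRange 1 width 1).foldl (fun acc c =>
      acc ++ [((r, c), (pvRays height width r c).filterMap (pvFirstSeat data))]) acc) []

-- occ = sum(grid[i][j].count('#') for i, j in ps)
def pvOcc (grid : List (List String)) (ps : List (Int × Int)) : Int :=
  (ps.map (fun p => ((pvCell grid p.1 p.2).toList.count '#' : Int))).sum

-- one step of Source B's while-loop body
def pvStepB (nbrs : List ((Int × Int) × List (Int × Int))) (grid : List (List String)) :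
    List (List String) :=
  nbrs.foldl (fun new e =>
    if pvCell grid e.1.1 e.1.2 == "L" && pvOcc grid e.2 == 0 then
      pvSet new e.1.1 e.1.2 "#"
    else if pvCell grid e.1.1 e.1.2 == "#" && decide (5 ≤ pvOcc grid e.2) then
      pvSet new e.1.1 e.1.2 "L"
    else new) grid

-- sum(row.count('#') for row in grid)
def pvCountOcc (grid : List (List String)) : Int :=
  (grid.map (fun row => (row.count "#" : Int))).sum

def pvLoopB (nbrs : List ((Int × Int) × List (Int × Int))) :
    Nat → List (List String) → Int
  | 0, grid => pvCountOcc grid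
  | fuel+1, grid =>
    let new := pvStepB nbrs grid
    if new == grid then pvCountOcc grid else pvLoopB nbrs fuel new

def part2_alt (data : List (List String)) : Int :=
  pvLoopB (pvBuildNbrs data) (pvFuel data) data

-- ===== PRECONDITION & SPEC =====
-- Pre_ excludes exactly the inputs on which Python A raises: the empty grid
-- (len(data[0]) → IndexError) and, when the first row is wider than 2, grids with a
-- middle row too short for the scanned columns 1..len(data[0])-2 (IndexError).
def Pre_part2 (data : List (List String)) : Prop :=
  data ≠ [] ∧
  ((PySem.List.pyGetD data 0 []).length ≤ 2 ∨
    ∀ i : Nat, i < data.length → 1 ≤ i → i + 1 < data.length →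
      (PySem.List.pyGetD data 0 []).length ≤ (data.getD i []).length + 1)
instance (data : List (List String)) : Decidable (Pre_part2 data) := by
  unfold Pre_part2; infer_instance

def pvWitness_part2 : List (List String) := [["L", "."], [".", "L"], ["#", "."]]

def Spec_part2 (data : List (List String)) (out : Int) : Prop := out = part2_alt data
instance (data : List (List String)) (out : Int) : Decidable (Spec_part2 data out) := by
  unfold Spec_part2; infer_instance

-- ===== CLAIM (what is proved, stated in full; the proofs are below) =====
def Claim_equal_part2 : Prop :=
  ∀ (data : List (List String)), Dom_part2 data → Pre_part2 data →
    Spec_part2 data (part2 data)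

-- ===== LEMMAS AND PROOFS =====

-- the invariant tying every grid reached by the iteration back to the original grid:
-- same shape, and floor/non-floor status of every cell unchanged
def pvInv (data g : List (List String)) : Prop :=
  g.length = data.length ∧
  (∀ i : Nat, (g.getD i []).length = (data.getD i []).length) ∧
  (∀ i j : Int, 0 ≤ i → 0 ≤ j → ((pvCell g i j = ".") ↔ (pvCell data i j = ".")))

theorem pvInv_refl (data : List (List String)) : pvInv data data :=
  ⟨rfl, fun _ => rfl, fun _ _ _ _ => Iff.rfl⟩

theorem foldl_pres {α β : Type} {P : β → Prop} (l : List α) (f : β → α → β) (init : β)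
    (h : ∀ acc x, x ∈ l → P acc → P (f acc x)) (h0 : P init) : P (l.foldl f init) := by
  induction l generalizing init with
  | nil => exact h0
  | cons a l ih =>
    exact ih _ (fun acc x hx => h acc x (List.mem_cons_of_mem _ hx))
      (h init a List.mem_cons_self h0)

theorem pvCell_nonneg (g : List (List String)) (i j : Int) (hi : 0 ≤ i) (hj : 0 ≤ j) :
    pvCell g i j = (g.getD i.toNat []).getD j.toNat "" := by
  simp [pvCell, PySem.List.pyGetD_of_nonneg _ _ hi, PySem.List.pyGetD_of_nonneg _ _ hj]

theorem getD_set_eq (t : List (List String)) (n : Nat) (row : List String) (i : Nat) :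
    ((t.set n row).getD i []) = if i = n ∧ n < t.length then row else t.getD i [] := by
  simp only [List.getD, List.getElem?_set]
  by_cases h1 : n = i
  · subst h1
    by_cases h2 : n < t.length
    · simp [h2]
    · simp [h2]
  · have h4 : ¬(i = n ∧ n < t.length) := fun h => h1 h.1.symm
    simp [h1, h4]

theorem pvSet_length (t : List (List String)) (r c : Int) (v : String) :
    (pvSet t r c v).length = t.length := by simp [pvSet]

theorem pvSet_row_length (t : List (List String)) (r c : Int) (v : String) (i : Nat) :
    ((pvSet t r c v).getD i []).length = (t.getD i []).length := by
  simp only [pvSet, getD_set_eq]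
  split_ifs with h
  · simp [h.1]
  · rfl

theorem pvCell_pvSet_ne (t : List (List String)) (r c : Int) (v : String) (i j : Int)
    (hr : 0 ≤ r) (hc : 0 ≤ c) (hi : 0 ≤ i) (hj : 0 ≤ j) (hne : ¬(i = r ∧ j = c)) :
    pvCell (pvSet t r c v) i j = pvCell t i j := by
  rw [pvCell_nonneg _ _ _ hi hj, pvCell_nonneg _ _ _ hi hj]
  by_cases hir : i = r
  · subst hir
    have hjc : j ≠ c := fun h => hne ⟨rfl, h⟩
    have hjc' : j.toNat ≠ c.toNat := fun h => hjc (by omega)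
    simp only [pvSet, getD_set_eq]
    split_ifs with h
    · simp only [List.getD]
      rw [List.getElem?_set]
      have hcj : c.toNat ≠ j.toNat := fun h' => hjc' h'.symm
      simp [hcj]
    · rfl
  · have hir' : i.toNat ≠ r.toNat := fun h => hir (by omega)
    simp only [pvSet, getD_set_eq]
    rw [if_neg (show ¬(i.toNat = r.toNat ∧ r.toNat < t.length) from fun h => hir' h.1)]

theorem pvCell_pvSet_self (t : List (List String)) (r c : Int) (v : String)
    (hr : 0 ≤ r) (hc : 0 ≤ c) :
    pvCell (pvSet t r c v) r c = v ∨ pvCell (pvSet t r c v) r c = pvCell t r c := by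
  rw [pvCell_nonneg _ _ _ hr hc, pvCell_nonneg _ _ _ hr hc]
  simp only [pvSet, getD_set_eq]
  split_ifs with h
  · by_cases hc' : c.toNat < (t.getD r.toNat []).length
    · left
      simp only [List.getD] at hc' ⊢
      rw [List.getElem?_set]
      simp [hc']
    · right
      simp only [List.getD] at hc' ⊢
      rw [List.getElem?_set]
      simp [hc']
  · right; rfl

-- every position visited by the eight rays from an interior cell has nonnegative coords
theorem pvRays_nonneg (height width r c : Int) (hr : 0 ≤ r) (hc : 0 ≤ c) :
    ∀ ray ∈ pvRays height width r c, ∀ p ∈ ray, 0 ≤ p.1 ∧ 0 ≤ p.2 := by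
  intro ray hray p hp
  simp only [pvRays, List.mem_cons, List.not_mem_nil, or_false] at hray
  obtain ⟨i, j⟩ := p
  rcases hray with h | h | h | h | h | h | h | h <;> subst h
  all_goals
    first
    | (simp only [List.mem_map] at hp
       obtain ⟨x, hx, hx2⟩ := hp
       first
       | rw [PySem.List.mem_pyRange_one] at hx
       | rw [PySem.List.mem_pyRange_neg_one] at hx
       cases hx2
       constructor <;> omega)
    | (have := List.of_mem_zip hp
       obtain ⟨h1, h2⟩ := this
       first
       | rw [PySem.List.mem_pyRange_one] at h1
       | rw [PySem.List.mem_pyRange_neg_one] at h1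
       first
       | rw [PySem.List.mem_pyRange_one] at h2
       | rw [PySem.List.mem_pyRange_neg_one] at h2
       constructor <;> omega)

-- A's break-loop agrees with B's find?-lookup, cell by cell, as long as the floor
-- pattern of g matches the original data
theorem pvFirstHit_find (data g : List (List String)) (ray : List (Int × Int))
    (h : ∀ p ∈ ray, ((pvCell g p.1 p.2 = ".") ↔ (pvCell data p.1 p.2 = "."))) :
    pvFirstHit g ray = (match pvFirstSeat data ray with
      | some p => pvCell g p.1 p.2
      | none => "") := by
  induction ray with
  | nil => rfl
  | cons p rest ih =>
    have hp := h p List.mem_cons_self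
    have hrest := fun q hq => h q (List.mem_cons_of_mem _ hq)
    by_cases hd : pvCell data p.1 p.2 = "."
    · have hg : pvCell g p.1 p.2 = "." := hp.mpr hd
      have hpred : (!(pvCell data p.1 p.2 == ".")) = false := by simp [hd]
      simp only [pvFirstHit, pvFirstSeat, List.find?_cons, hpred]
      simp only [hg, ne_eq, not_true_eq_false, if_false]
      simp only [pvFirstSeat] at ih
      simpa using ih hrest
    · have hg : pvCell g p.1 p.2 ≠ "." := fun h' => hd (hp.mp h')
      have hpred : (!(pvCell data p.1 p.2 == ".")) = true := by simp [hd]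
      simp only [pvFirstHit, pvFirstSeat, List.find?_cons, hpred]
      simp [hg]

-- count of '#' chars in A's surr = B's occupied sum over the surviving neighbours
theorem pvSurr_count (data g : List (List String)) (L : List (List (Int × Int)))
    (h : ∀ ray ∈ L, ∀ p ∈ ray, ((pvCell g p.1 p.2 = ".") ↔ (pvCell data p.1 p.2 = "."))) :
    ((L.map (fun ray => (pvFirstHit g ray).toList)).flatten).count '#'
      = ((L.filterMap (pvFirstSeat data)).map
          (fun p => (pvCell g p.1 p.2).toList.count '#')).sum := by
  induction L with
  | nil => rfl
  | cons ray L ih =>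
    have hhead := pvFirstHit_find data g ray (h ray List.mem_cons_self)
    have htail := ih (fun r hr => h r (List.mem_cons_of_mem _ hr))
    simp only [List.map_cons, List.flatten_cons, List.count_append, List.filterMap_cons]
    cases hfind : pvFirstSeat data ray with
    | none =>
      rw [hhead, hfind]
      simp [htail]
    | some p =>
      rw [hhead, hfind]
      simp [htail]

theorem pvOcc_natCast (g : List (List String)) (ps : List (Int × Int)) :
    pvOcc g ps = ((ps.map (fun p => (pvCell g p.1 p.2).toList.count '#')).sum : Nat) := by
  simp [pvOcc]
  induction ps with
  | nil => rfl
  | cons p ps ih => simp [ih]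

-- Bool bridges between A's string tests and B's integer counts
theorem pvNoHash_eq_zero (l : List Char) :
    (!(l.contains '#')) = ((l.count '#' : Int) == 0) := by
  by_cases hm : '#' ∈ l
  · have h1 : l.contains '#' = true := List.contains_iff_mem.mpr hm
    have h2 : 0 < l.count '#' := List.count_pos_iff.mpr hm
    have h3 : ((l.count '#' : Int)) ≠ 0 := by
      have := Nat.pos_iff_ne_zero.mp h2
      exact_mod_cast this
    have h4 : List.count '#' l ≠ 0 := by omega
    rw [h1]
    simp [h4]
  · have h1 : l.contains '#' = false :=
      Bool.eq_false_iff.mpr (fun hx => hm (List.contains_iff_mem.mp hx))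
    have h2 : l.count '#' = 0 := List.count_eq_zero.mpr hm
    rw [h1, h2]
    simp

theorem pvFive_cast (l : List Char) :
    (decide (5 ≤ l.count '#')) = (decide ((5 : Int) ≤ (l.count '#' : Nat))) := by
  simp only [decide_eq_decide]
  omega

-- the two occupancy tests of A, rewritten through the precomputed neighbour list
theorem pvOccu_eq (data g : List (List String)) (r c : Int) (hr : 0 ≤ r) (hc : 0 ≤ c)
    (hInv : pvInv data g) (para : String) :
    occuSeatAlld g r c para =
      (if para == "no" then
        pvOcc g ((pvRays ((data.length : Int) - 1)
          (((PySem.List.pyGetD data 0 []).length : Int) - 1) r c).filterMap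
          (pvFirstSeat data)) == 0
       else decide (5 ≤ pvOcc g ((pvRays ((data.length : Int) - 1)
          (((PySem.List.pyGetD data 0 []).length : Int) - 1) r c).filterMap
          (pvFirstSeat data)))) := by
  obtain ⟨hlen, hrows, hdot⟩ := hInv
  have hH : (g.length : Int) - 1 = (data.length : Int) - 1 := by rw [hlen]
  have hW : ((PySem.List.pyGetD g 0 []).length : Int) - 1
      = ((PySem.List.pyGetD data 0 []).length : Int) - 1 := by
    rw [PySem.List.pyGetD_zero, PySem.List.pyGetD_zero]
    have h0 := hrows 0
    omega
  have hmem : ∀ ray ∈ pvRays ((data.length : Int) - 1)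
      (((PySem.List.pyGetD data 0 []).length : Int) - 1) r c, ∀ p ∈ ray,
      ((pvCell g p.1 p.2 = ".") ↔ (pvCell data p.1 p.2 = ".")) := by
    intro ray hray p hp
    have := pvRays_nonneg _ _ r c hr hc ray hray p hp
    exact hdot p.1 p.2 this.1 this.2
  have hcnt := pvSurr_count data g _ hmem
  simp only [occuSeatAlld, hH, hW]
  rw [pvOcc_natCast, ← hcnt]
  by_cases hpara : (para == "no") = true
  · simp only [hpara, if_true]
    exact pvNoHash_eq_zero _
  · simp only [eq_false_of_ne_true hpara, Bool.false_eq_true, if_false]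
    exact pvFive_cast _

theorem pvOccu_no (data g : List (List String)) (r c : Int) (hr : 0 ≤ r) (hc : 0 ≤ c)
    (hInv : pvInv data g) :
    occuSeatAlld g r c "no" = (pvOcc g ((pvRays ((data.length : Int) - 1)
      (((PySem.List.pyGetD data 0 []).length : Int) - 1) r c).filterMap
      (pvFirstSeat data)) == 0) := by
  rw [pvOccu_eq data g r c hr hc hInv "no",
    if_pos (show (("no" : String) == "no") = true from rfl)]

theorem pvOccu_five (data g : List (List String)) (r c : Int) (hr : 0 ≤ r) (hc : 0 ≤ c)
    (hInv : pvInv data g) :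
    occuSeatAlld g r c "five" = decide (5 ≤ pvOcc g ((pvRays ((data.length : Int) - 1)
      (((PySem.List.pyGetD data 0 []).length : Int) - 1) r c).filterMap
      (pvFirstSeat data))) := by
  rw [pvOccu_eq data g r c hr hc hInv "five",
    if_neg (show ¬((("five" : String) == "no") = true) from by decide)]

-- B's precomputed table is the flattened double loop over interior cells
theorem pvBuildNbrs_eq (data : List (List String)) :
    pvBuildNbrs data = (PySem.List.pyRange 1 ((data.length : Int) - 1) 1).flatMap
      (fun r => (PySem.List.pyRange 1 (((PySem.List.pyGetD data 0 []).length : Int) - 1) 1).map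
        (fun c => ((r, c), (pvRays ((data.length : Int) - 1)
          (((PySem.List.pyGetD data 0 []).length : Int) - 1) r c).filterMap
          (pvFirstSeat data)))) := by
  simp only [pvBuildNbrs]
  rw [PySem.List.foldl_congr_mem _ _
    (fun acc r => acc ++ (PySem.List.pyRange 1
      (((PySem.List.pyGetD data 0 []).length : Int) - 1) 1).map
      (fun c => ((r, c), (pvRays ((data.length : Int) - 1)
        (((PySem.List.pyGetD data 0 []).length : Int) - 1) r c).filterMap
        (pvFirstSeat data)))) _
    (fun acc r _ => PySem.List.foldl_append_singleton_eq_map _ _ _)]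
  rw [PySem.List.foldl_append_eq_flatMap]
  simp

-- one step of B coincides with one step of A on every grid satisfying the invariant
theorem pvStep_eq (data g : List (List String)) (hInv : pvInv data g) :
    pvStepB (pvBuildNbrs data) g = pvStepA g := by
  obtain ⟨hlen, hrows, hdot⟩ := hInv
  have hH : (g.length : Int) - 1 = (data.length : Int) - 1 := by rw [hlen]
  have hW : ((PySem.List.pyGetD g 0 []).length : Int) - 1
      = ((PySem.List.pyGetD data 0 []).length : Int) - 1 := by
    rw [PySem.List.pyGetD_zero, PySem.List.pyGetD_zero]
    have h0 := hrows 0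
    omega
  rw [pvStepA]
  simp only [hH, hW]
  rw [pvStepB, pvBuildNbrs_eq, List.foldl_flatMap]
  apply PySem.List.foldl_congr_mem
  intro acc r hrmem
  rw [List.foldl_map]
  apply PySem.List.foldl_congr_mem
  intro acc2 c hcmem
  have hr1 : 1 ≤ r := (PySem.List.mem_pyRange_one.mp hrmem).1
  have hc1 : 1 ≤ c := (PySem.List.mem_pyRange_one.mp hcmem).1
  have hno := pvOccu_no data g r c (by omega) (by omega) ⟨hlen, hrows, hdot⟩
  have hfive := pvOccu_five data g r c (by omega) (by omega) ⟨hlen, hrows, hdot⟩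
  rw [hno, hfive]

-- one step of A preserves the invariant: only 'L'/'#' cells are overwritten, with
-- 'L'/'#', so shape and floor pattern never change
theorem pvStepA_pres (data g : List (List String)) (hInv : pvInv data g) :
    pvInv data (pvStepA g) := by
  obtain ⟨hlen, hrows, hdot⟩ := hInv
  simp only [pvStepA]
  set P : List (List String) → Prop := fun t =>
    t.length = g.length ∧
    (∀ i : Nat, (t.getD i []).length = (g.getD i []).length) ∧
    (∀ i j : Int, 0 ≤ i → 0 ≤ j →
      (pvCell t i j = pvCell g i j ∨ (pvCell t i j ≠ "." ∧ pvCell g i j ≠ "."))) with hP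
  have hset : ∀ (t : List (List String)) (r c : Int) (v : String), 1 ≤ r → 1 ≤ c →
      v ≠ "." → pvCell g r c ≠ "." → P t → P (pvSet t r c v) := by
    intro t r c v hr hc hv hg ⟨h1, h2, h3⟩
    refine ⟨by rw [pvSet_length, h1], fun i => by rw [pvSet_row_length]; exact h2 i, ?_⟩
    intro i j hi hj
    by_cases hij : i = r ∧ j = c
    · obtain ⟨rfl, rfl⟩ := hij
      rcases pvCell_pvSet_self t i j v (by omega) (by omega) with h | h
      · right; rw [h]; exact ⟨hv, hg⟩
      · rw [h]; exact h3 i j hi hj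
    · rw [pvCell_pvSet_ne t r c v i j (by omega) (by omega) hi hj hij]
      exact h3 i j hi hj
  have hmain : P ((PySem.List.pyRange 1 ((g.length : Int) - 1) 1).foldl (fun temp row =>
      (PySem.List.pyRange 1 (((PySem.List.pyGetD g 0 []).length : Int) - 1) 1).foldl
        (fun temp seat =>
          if pvCell g row seat == "L" && occuSeatAlld g row seat "no" then
            pvSet temp row seat "#"
          else if pvCell g row seat == "#" && occuSeatAlld g row seat "five" then
            pvSet temp row seat "L"
          else temp) temp) g) := by
    apply foldl_pres _ _ _ ?_ ?_
    · intro acc row hrowmem haccP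
      have hr1 : 1 ≤ row := (PySem.List.mem_pyRange_one.mp hrowmem).1
      apply foldl_pres _ _ _ ?_ haccP
      intro acc2 seat hseatmem haccP2
      have hc1 : 1 ≤ seat := (PySem.List.mem_pyRange_one.mp hseatmem).1
      split_ifs with h1 h2
      · have hgL : pvCell g row seat = "L" := by
          have := h1
          simp only [Bool.and_eq_true, beq_iff_eq] at this
          exact this.1
        exact hset acc2 row seat "#" hr1 hc1 (by decide) (by rw [hgL]; decide) haccP2
      · have hgS : pvCell g row seat = "#" := by
          simp only [Bool.and_eq_true, beq_iff_eq] at h2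
          exact h2.1
        exact hset acc2 row seat "L" hr1 hc1 (by decide) (by rw [hgS]; decide) haccP2
      · exact haccP2
    · exact ⟨rfl, fun _ => rfl, fun i j _ _ => Or.inl rfl⟩
  obtain ⟨g1, g2, g3⟩ := hmain
  refine ⟨g1.trans hlen, fun i => (g2 i).trans (hrows i), ?_⟩
  intro i j hi hj
  rcases g3 i j hi hj with h | h
  · rw [h]; exact hdot i j hi hj
  · constructor
    · intro h'; exact absurd h' h.1
    · intro h'
      exact absurd ((hdot i j hi hj).mpr h') h.2

-- A's occupied-cell count equals B's
theorem pvCount_eq (g : List (List String)) : totalOccu g = pvCountOcc g := by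
  rw [totalOccu, pvCountOcc]
  have hrow : ∀ (row : List String) (a : Int),
      row.foldl (fun t j => if j == "#" then t + 1 else t) a = a + (row.count "#" : Int) := by
    intro row a
    exact PySem.List.foldl_beq_add_one row "#" a
  calc g.foldl (fun total row => row.foldl (fun t j => if j == "#" then t + 1 else t) total) 0
      = g.foldl (fun total row => total + (row.count "#" : Int)) 0 := by
        apply PySem.List.foldl_congr_mem
        intro acc row _
        exact hrow row acc
    _ = 0 + (g.map (fun row => (row.count "#" : Int))).sum := PySem.List.foldl_add _ _ _
    _ = (g.map (fun row => (row.count "#" : Int))).sum := by ring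

theorem pvLoop_eq (data : List (List String)) :
    ∀ (fuel : Nat) (g : List (List String)), pvInv data g →
      pvLoopA fuel g = pvLoopB (pvBuildNbrs data) fuel g := by
  intro fuel
  induction fuel with
  | zero => intro g _; simp [pvLoopA, pvLoopB, pvCount_eq]
  | succ n ih =>
    intro g hInv
    simp only [pvLoopA, pvLoopB]
    rw [pvStep_eq data g hInv]
    by_cases h : pvStepA g == g
    · simp only [h, if_true]
      have : (pvStepA g == g) = true := h
      have heq : pvStepA g = g := by simpa using this
      rw [pvCount_eq, heq]
    · simp only [h, Bool.false_eq_true, if_false]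
      exact ih (pvStepA g) (pvStepA_pres data g hInv)

-- ===== VERDICT (by name: the statement is the Claim_ definition above) =====
theorem part2_spec : Claim_equal_part2 := by
  intro data _ _
  unfold Spec_part2 part2 part2_alt
  exact pvLoop_eq data (pvFuel data) data (pvInv_refl data)
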